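-- pv_equiv track=rewrite | github.com/757607106/nanobot | nanobot/web/mcp_repository.py | _derive_server_name
-- ===== SOURCE A (Python) =====
-- from typing import Any
--
-- def _derive_server_name(repo_name: str, candidate: Any) -> str:
--     raw = str(candidate or "").strip().split("/")[-1]
--     if not raw:
--         raw = repo_name
--     slug = []
--     for char in raw.lower():
--         if char.isalnum():
--             slug.append(char)
--         else:
--             if not slug or slug[-1] != "-":
--                 slug.append("-")
--     return "".join(slug).strip("-") or "mcp-server"
-- ===== SOURCE B (Python) =====
-- def _derive_server_name(repo_name: str, candidate) -> str:
--     raw = str(candidate or "").strip().split("/")[-1]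
--     if not raw:
--         raw = repo_name
--     s = raw.lower()
--     tokens = []
--     i, n = 0, len(s)
--     while i < n:
--         if s[i].isalnum():
--             j = i
--             while j < n and s[j].isalnum():
--                 j += 1
--             tokens.append(s[i:j])
--             i = j
--         else:
--             i += 1
--     return "-".join(tokens) or "mcp-server"
-- ===== Notes on version B (the rewrite author's own statement) =====
-- stated objective: alternative
-- what changed: Replaces A's char-by-char slug builder (append dash unless previous is a dash, then strip('-')) by a two-level scan that extracts maximal alphanumeric runs as tokens and joins them with '-', so no dash collapsing or trimming is ever needed.
import Mathlib
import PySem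

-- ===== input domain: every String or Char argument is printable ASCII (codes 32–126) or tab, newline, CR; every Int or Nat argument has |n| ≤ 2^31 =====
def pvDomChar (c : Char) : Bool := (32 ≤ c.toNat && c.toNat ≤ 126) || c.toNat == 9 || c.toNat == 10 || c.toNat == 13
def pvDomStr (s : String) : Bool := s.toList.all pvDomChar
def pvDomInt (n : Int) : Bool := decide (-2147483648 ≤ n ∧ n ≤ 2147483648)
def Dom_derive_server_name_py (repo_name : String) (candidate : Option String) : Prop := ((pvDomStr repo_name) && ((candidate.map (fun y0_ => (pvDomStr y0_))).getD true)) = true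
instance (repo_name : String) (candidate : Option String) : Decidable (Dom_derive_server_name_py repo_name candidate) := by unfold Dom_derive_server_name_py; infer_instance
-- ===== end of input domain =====

-- B replaces A's char-by-char slug builder (dash-collapsing + strip('-')) by extracting maximal
-- alphanumeric runs and joining them with '-'; equivalence of return values is proved for ALL inputs.
-- (Char.isalnum is ported via PySem.Chars.isalnum, exact on the ASCII domain.)

-- ===== PORT A =====
-- one loop-body step of A's `for char in raw.lower(): ...`
def pvStepA (slug : List Char) (c : Char) : List Char :=
  if PySem.Chars.isalnum c then slug ++ [c]
  else if slug = [] ∨ slug.getLast? ≠ some '-' then slug ++ ['-'] else slug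

def derive_server_name_py (repo_name : String) (candidate : Option String) : String :=
  -- raw = str(candidate or "").strip().split("/")[-1]   (split with a nonempty sep never returns [], so getD is never taken)
  let raw0 := (PySem.List.pyGet? ((PySem.Str.split? (PySem.Str.strip (candidate.getD "")) "/").getD []) (-1)).getD ""
  let raw := if raw0 = "" then repo_name else raw0
  let slug := (PySem.Str.lower raw).toList.foldl pvStepA []
  let res := PySem.Str.stripChars (String.ofList slug) "-"
  if res = "" then "mcp-server" else res

-- ===== PORT B =====
-- the outer while-loop of B: each alnum position starts an inner scan collecting the maximal run
def pvToks : List Char → List (List Char)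
  | [] => []
  | c :: cs =>
    if PySem.Chars.isalnum c then
      (c :: cs.takeWhile PySem.Chars.isalnum) :: pvToks (cs.dropWhile PySem.Chars.isalnum)
    else pvToks cs
termination_by l => l.length
decreasing_by
  · simpa using Nat.lt_succ_of_le (List.length_dropWhile_le _ _)
  · simp

def derive_server_name_py_alt (repo_name : String) (candidate : Option String) : String :=
  let raw0 := (PySem.List.pyGet? ((PySem.Str.split? (PySem.Str.strip (candidate.getD "")) "/").getD []) (-1)).getD ""
  let raw := if raw0 = "" then repo_name else raw0
  let toks := pvToks (PySem.Str.lower raw).toList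
  let res := PySem.Str.join "-" (toks.map String.ofList)
  if res = "" then "mcp-server" else res

-- ===== PRECONDITION & SPEC =====
def Spec_derive_server_name_py (repo_name : String) (candidate : Option String) (out : String) : Prop := out = derive_server_name_py_alt repo_name candidate
instance (repo_name : String) (candidate : Option String) (out : String) : Decidable (Spec_derive_server_name_py repo_name candidate out) := by unfold Spec_derive_server_name_py; infer_instance

-- ===== CLAIM (what is proved, stated in full; the proofs are below) =====
def Claim_equal_derive_server_name_py : Prop := ∀ (repo_name : String) (candidate : Option String), Dom_derive_server_name_py repo_name candidate → Spec_derive_server_name_py repo_name candidate (derive_server_name_py repo_name candidate)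

-- ===== LEMMAS AND PROOFS =====

-- right strip of dashes, the list-level form of the trailing half of .strip("-")
def pvRstrip (l : List Char) : List Char := (l.reverse.dropWhile (· == '-')).reverse

theorem pvStripChars_eq (l : List Char) :
    PySem.Chars.stripChars l ['-'] = pvRstrip (l.dropWhile (· == '-')) := by
  simp [PySem.Chars.stripChars, pvRstrip]
  rfl

theorem pvRstrip_nil : pvRstrip [] = [] := rfl

theorem pvRstrip_cons (c : Char) (x : List Char) :
    pvRstrip (c :: x) =
      if pvRstrip x = [] then (if c == '-' then [] else [c]) else c :: pvRstrip x := by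
  simp only [pvRstrip, List.reverse_cons, List.dropWhile_append]
  by_cases h : (x.reverse.dropWhile (· == '-')) = []
  · simp [h, List.dropWhile]
    by_cases hc : c = '-' <;> simp [hc]
    · cases hbc : c == '-'
      · simp
      · simp_all
  · simp [h, List.isEmpty_iff, List.reverse_eq_nil_iff]

theorem pvGoApp (l : List Char) : ∀ (s t : List Char), t ≠ [] →
    List.foldl pvStepA (s ++ t) l = s ++ List.foldl pvStepA t l := by
  induction l with
  | nil => intro s t _; simp
  | cons d l ih =>
    intro s t ht
    simp only [List.foldl_cons]
    by_cases hd : PySem.Chars.isalnum d = true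
    · have : pvStepA (s ++ t) d = s ++ (t ++ [d]) := by
        simp [pvStepA, hd]
      rw [this, ih s (t ++ [d]) (by simp)]
      have : pvStepA t d = t ++ [d] := by simp [pvStepA, hd]
      rw [this]
    · have hlast : (s ++ t).getLast? = t.getLast? := List.getLast?_append_of_ne_nil s ht
      by_cases hl : t.getLast? = some '-'
      · have h1 : pvStepA (s ++ t) d = s ++ t := by
          simp [pvStepA, hd, hlast, hl, ht]
        have h2 : pvStepA t d = t := by simp [pvStepA, hd, hl, ht]
        rw [h1, h2, ih s t ht]
      · have h1 : pvStepA (s ++ t) d = s ++ (t ++ ['-']) := by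
          simp [pvStepA, hd, hlast, hl]
        have h2 : pvStepA t d = t ++ ['-'] := by simp [pvStepA, hd, hl]
        rw [h1, h2, ih s (t ++ ['-']) (by simp)]

theorem pvNotDash {c : Char} (h : PySem.Chars.isalnum c = true) : (c == '-') = false := by
  rcases Bool.or_eq_true_iff.mp h with h' | h'
  · rcases Bool.or_eq_true_iff.mp h' with h'' | h'' <;>
    · simp only [PySem.Chars.isupper, PySem.Chars.islower, Bool.and_eq_true, decide_eq_true_eq] at h''
      simp only [beq_eq_false_iff_ne, ne_eq]
      rintro rfl
      simp at h''
  · simp only [PySem.Chars.isdigit, Bool.and_eq_true, decide_eq_true_eq] at h'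
    simp only [beq_eq_false_iff_ne, ne_eq]
    rintro rfl
    simp at h'

theorem pvNeDash {c : Char} (h : PySem.Chars.isalnum c = true) : ¬ c = '-' := by
  have := pvNotDash h
  simpa using this

theorem pvIntercalate_cons (s x : List Char) (xs : List (List Char)) :
    List.intercalate s (x :: xs) = x ++ (if xs = [] then [] else s ++ List.intercalate s xs) := by
  cases xs <;> simp [List.intercalate, List.intersperse]

-- combined invariant: the stripped result of A's loop started in state [c] (resp. ['-'])
-- equals B's dash-join of the remaining alnum runs
theorem pvMain34 (l : List Char) :
    (∀ c, PySem.Chars.isalnum c = true →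
      pvRstrip (List.foldl pvStepA [c] l) =
        List.intercalate ['-'] ((c :: l.takeWhile PySem.Chars.isalnum) ::
          pvToks (l.dropWhile PySem.Chars.isalnum))) ∧
    (pvRstrip (List.foldl pvStepA ['-'] l) =
      if pvToks l = [] then [] else '-' :: List.intercalate ['-'] (pvToks l)) := by
  induction l with
  | nil =>
    constructor
    · intro c hc
      simp [pvRstrip_cons, pvRstrip_nil, pvNotDash hc, pvIntercalate_cons, pvToks]
    · simp [pvRstrip_cons, pvRstrip_nil, pvToks]
  | cons d l ih =>
    obtain ⟨ih3, ih4⟩ := ih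
    have hIntNe : ∀ (c : Char) (ts : List (List Char)),
        List.intercalate ['-'] ((c :: l.takeWhile PySem.Chars.isalnum) :: ts) ≠ [] := by
      intro c ts
      rw [pvIntercalate_cons]
      simp
    constructor
    · intro c hc
      by_cases hd : PySem.Chars.isalnum d = true
      · have step : List.foldl pvStepA [c] (d :: l) = [c] ++ List.foldl pvStepA [d] l := by
          simp only [List.foldl_cons]
          have : pvStepA [c] d = [c] ++ [d] := by simp [pvStepA, hd]
          rw [this, pvGoApp l [c] [d] (by simp)]
        rw [step, List.singleton_append, pvRstrip_cons, ih3 d hd]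
        simp only [hIntNe d _, if_false]
        rw [List.takeWhile_cons_of_pos hd, List.dropWhile_cons_of_pos hd]
        rw [pvIntercalate_cons, pvIntercalate_cons]
        simp
      · have step : List.foldl pvStepA [c] (d :: l) = [c] ++ List.foldl pvStepA ['-'] l := by
          simp only [List.foldl_cons]
          have : pvStepA [c] d = [c] ++ ['-'] := by
            simp [pvStepA, hd, pvNeDash hc]
          rw [this, pvGoApp l [c] ['-'] (by simp)]
        rw [step, List.singleton_append, pvRstrip_cons, ih4]
        rw [List.takeWhile_cons_of_neg hd, List.dropWhile_cons_of_neg hd]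
        have htoks : pvToks (d :: l) = pvToks l := by simp [pvToks, hd]
        rw [htoks, pvIntercalate_cons]
        by_cases h0 : pvToks l = []
        · simp [h0, pvNotDash hc]
        · simp [h0]
    · by_cases hd : PySem.Chars.isalnum d = true
      · have step : List.foldl pvStepA ['-'] (d :: l) = ['-'] ++ List.foldl pvStepA [d] l := by
          simp only [List.foldl_cons]
          have : pvStepA ['-'] d = ['-'] ++ [d] := by simp [pvStepA, hd]
          rw [this, pvGoApp l ['-'] [d] (by simp)]
        rw [step, List.singleton_append, pvRstrip_cons, ih3 d hd]
        simp only [hIntNe d _, if_false]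
        have htoks : pvToks (d :: l) =
            (d :: l.takeWhile PySem.Chars.isalnum) :: pvToks (l.dropWhile PySem.Chars.isalnum) := by
          simp [pvToks, hd]
        rw [htoks]
        simp
      · have step : List.foldl pvStepA ['-'] (d :: l) = List.foldl pvStepA ['-'] l := by
          simp only [List.foldl_cons]
          have : pvStepA ['-'] d = ['-'] := by simp [pvStepA, hd]
          rw [this]
        have htoks : pvToks (d :: l) = pvToks l := by simp [pvToks, hd]
        rw [step, htoks, ih4]

-- full strip (both ends) at the list level
def pvStrip (l : List Char) : List Char := pvRstrip (l.dropWhile (· == '-'))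

-- a leading sentinel dash in A's state is invisible after stripping
theorem pvStrip_dash_state (l : List Char) :
    pvStrip (List.foldl pvStepA ['-'] l) = pvStrip (List.foldl pvStepA [] l) := by
  cases l with
  | nil => simp [pvStrip, List.dropWhile, pvRstrip_nil]
  | cons d l =>
    by_cases hd : PySem.Chars.isalnum d = true
    · have s1 : List.foldl pvStepA ['-'] (d :: l) = ['-'] ++ List.foldl pvStepA [d] l := by
        simp only [List.foldl_cons]
        have : pvStepA ['-'] d = ['-'] ++ [d] := by simp [pvStepA, hd]
        rw [this, pvGoApp l ['-'] [d] (by simp)]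
      have s2 : List.foldl pvStepA [] (d :: l) = List.foldl pvStepA [d] l := by
        simp only [List.foldl_cons]
        have : pvStepA [] d = [d] := by simp [pvStepA, hd]
        rw [this]
      rw [s1, s2, List.singleton_append]
      simp [pvStrip, List.dropWhile]
    · have s1 : List.foldl pvStepA ['-'] (d :: l) = List.foldl pvStepA ['-'] l := by
        simp only [List.foldl_cons]
        have : pvStepA ['-'] d = ['-'] := by simp [pvStepA, hd]
        rw [this]
      have s2 : List.foldl pvStepA [] (d :: l) = List.foldl pvStepA ['-'] l := by
        simp only [List.foldl_cons]
        have : pvStepA [] d = ['-'] := by simp [pvStepA, hd]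
        rw [this]
      rw [s1, s2]

-- MAIN list-level equivalence: A's stripped slug = B's dash-join of alnum runs
theorem pvMain (l : List Char) :
    pvStrip (List.foldl pvStepA [] l) = List.intercalate ['-'] (pvToks l) := by
  induction l with
  | nil => simp [pvStrip, pvRstrip_nil, pvToks, List.intercalate]
  | cons c l ih =>
    by_cases hc : PySem.Chars.isalnum c = true
    · have s2 : List.foldl pvStepA [] (c :: l) = List.foldl pvStepA [c] l := by
        simp only [List.foldl_cons]
        have : pvStepA [] c = [c] := by simp [pvStepA, hc]
        rw [this]
      obtain ⟨t, ht⟩ : ∃ t, List.foldl pvStepA [c] l = c :: t := by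
        cases l with
        | nil => exact ⟨[], rfl⟩
        | cons d l' =>
          simp only [List.foldl_cons]
          by_cases hd : PySem.Chars.isalnum d = true
          · have : pvStepA [c] d = [c] ++ [d] := by simp [pvStepA, hd]
            rw [this, pvGoApp l' [c] [d] (by simp)]
            exact ⟨_, rfl⟩
          · have : pvStepA [c] d = [c] ++ ['-'] := by simp [pvStepA, hd, pvNeDash hc]
            rw [this, pvGoApp l' [c] ['-'] (by simp)]
            exact ⟨_, rfl⟩
      have htoks : pvToks (c :: l) =
          (c :: l.takeWhile PySem.Chars.isalnum) :: pvToks (l.dropWhile PySem.Chars.isalnum) := by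
        simp [pvToks, hc]
      rw [s2, htoks, ← (pvMain34 l).1 c hc]
      simp only [pvStrip, ht]
      rw [List.dropWhile_cons_of_neg (by simp [pvNotDash hc])]
    · have s2 : List.foldl pvStepA [] (c :: l) = List.foldl pvStepA ['-'] l := by
        simp only [List.foldl_cons]
        have : pvStepA [] c = ['-'] := by simp [pvStepA, hc]
        rw [this]
      have htoks : pvToks (c :: l) = pvToks l := by simp [pvToks, hc]
      rw [s2, htoks, pvStrip_dash_state, ih]

theorem pvString_ext {a b : String} (h : a.toList = b.toList) : a = b := by
  have := congrArg String.ofList h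
  simpa [String.ofList_toList] using this

-- string-level core: A's tail computation equals B's, for any raw string
theorem pvCore (raw : String) :
    PySem.Str.stripChars
        (String.ofList ((PySem.Str.lower raw).toList.foldl pvStepA [])) "-" =
      PySem.Str.join "-" ((pvToks (PySem.Str.lower raw).toList).map String.ofList) := by
  apply pvString_ext
  rw [PySem.Str.toList_stripChars, PySem.Str.toList_join]
  simp only [String.toList_ofList, List.map_map]
  have h1 : ("-" : String).toList = ['-'] := by decide
  rw [h1]
  have h2 : List.map (String.toList ∘ String.ofList) (pvToks (PySem.Str.lower raw).toList) =
      pvToks (PySem.Str.lower raw).toList := by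
    rw [show (String.toList ∘ String.ofList) = id from funext (fun _ => String.toList_ofList)]
    exact List.map_id _
  rw [h2]
  have := pvMain (PySem.Str.lower raw).toList
  simpa [pvStrip, pvStripChars_eq] using this

-- ===== VERDICT (by name: the statement is the Claim_ definition above) =====
theorem derive_server_name_py_spec : Claim_equal_derive_server_name_py := by
  intro repo_name candidate _
  unfold Spec_derive_server_name_py derive_server_name_py derive_server_name_py_alt
  simp only [pvCore]
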